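-- pv_equiv track=rewrite | github.com/domi1504/sat-project | sat/solve/local_search/cover_code.py | self_concatenate
-- ===== SOURCE A (Python) =====
-- from itertools import product
--
-- def self_concatenate(assignment: list[dict[int, bool]], k: int) -> list[dict[int, bool]]:
--     """
--     Concatenates the given codewords with themselves k times to create longer codewords.
--
--     Used to extend a base covering code to higher n_high, preserving the structure
--     of the original code in blocks of size n.
--
--     Returns A x A x ... x A (k times) of input assignment A.
--
--     :param assignment: List of codewords, each a dict mapping variable indices (1-based) to boolean values.
--     :param k: Number of times to concatenate the codewords.
--     :return: A new list of extended codewords of length k·n.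
--     """
--
--     # Assert that all codewords in cover cove have same length
--     assert all(len(cw) == len(assignment[0]) for cw in assignment)
--     n = len(assignment[0])
--
--     if k < 1:
--         raise ValueError("k must be at least 1")
--     if k == 1:
--         return assignment
--
--     result = []
--     # Generate all k-tuples of codewords
--     for tuple_of_codewords in product(assignment, repeat=k):
--         new_codeword = {}
--         for i, codeword in enumerate(tuple_of_codewords):
--             # From 1 to n, not 0 to n-1
--             for j in range(1, n+1):
--                 new_codeword[i * n + j] = codeword.get(j, False)
--         result.append(new_codeword)
--     return result
-- ===== SOURCE B (Python) =====
-- def self_concatenate(assignment: list[dict[int, bool]], k: int) -> list[dict[int, bool]]: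
--     """Iterative left-fold version: extend the current result block by block
--     instead of enumerating all k-tuples with itertools.product."""
--     assert all(len(cw) == len(assignment[0]) for cw in assignment)
--     n = len(assignment[0])
--
--     if k < 1:
--         raise ValueError("k must be at least 1")
--     if k == 1:
--         return assignment
--
--     result = [{j: cw.get(j, False) for j in range(1, n + 1)} for cw in assignment]
--     for m in range(1, k):
--         result = [{**e, **{m * n + j: b.get(j, False) for j in range(1, n + 1)}}
--                   for e in result for b in assignment]
--     return result
-- ===== Notes on version B (the rewrite author's own statement) =====
-- stated objective: alternative
-- what changed: Replaces the single itertools.product(assignment, repeat=k) enumeration of k-tuples (each rebuilt key by key) with an iterative left fold that starts from the normalized one-block codewords and extends every partial codeword by one fresh block per round.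
import Mathlib
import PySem

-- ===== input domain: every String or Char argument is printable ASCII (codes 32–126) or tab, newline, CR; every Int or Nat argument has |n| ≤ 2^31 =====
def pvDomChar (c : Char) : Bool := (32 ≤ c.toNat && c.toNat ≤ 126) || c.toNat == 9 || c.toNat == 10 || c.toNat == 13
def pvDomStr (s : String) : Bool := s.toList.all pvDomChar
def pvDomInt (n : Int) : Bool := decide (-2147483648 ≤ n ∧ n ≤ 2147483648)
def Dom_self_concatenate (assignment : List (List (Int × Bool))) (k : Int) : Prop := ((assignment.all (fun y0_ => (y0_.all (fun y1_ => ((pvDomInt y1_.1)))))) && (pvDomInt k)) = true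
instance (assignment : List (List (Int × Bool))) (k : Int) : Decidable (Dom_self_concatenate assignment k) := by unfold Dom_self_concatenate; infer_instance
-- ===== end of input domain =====

-- B replaces the itertools.product enumeration of k-tuples by an iterative block-by-block
-- left fold (objective: alternative decomposition, same asymptotic cost).

-- ===== PORT A =====
-- product(assignment, repeat=k): all k-tuples, leftmost factor varying slowest
def pvTuples (A : List (List (Int × Bool))) : Nat → List (List (List (Int × Bool)))
  | 0 => [[]]
  | m+1 => A.flatMap (fun a => (pvTuples A m).map (fun t => a :: t))

def self_concatenate (assignment : List (List (Int × Bool))) (k : Int) : List (List (Int × Bool)) :=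
  match assignment with
  | [] => []   -- Python raises IndexError at len(assignment[0]) here (outside Pre_)
  | cw0 :: _ =>
    let n : Int := cw0.length
    if k == 1 then assignment
    else
      (pvTuples assignment k.toNat).foldl
        (fun result t =>
          result ++ [((PySem.List.enumerate t).foldl
              (fun d p =>
                (PySem.List.pyRange 1 (n+1) 1).foldl
                  (fun d j => d.insert (p.1 * n + j) (PySem.Dict.getD (PySem.Dict.mk p.2) j false)) d)
              PySem.Dict.empty).items]) []

-- ===== PORT B =====
-- the dict comprehension {m*n+j: b.get(j, False) for j in range(1, n+1)}
def pvCompB (m n : Int) (b : List (Int × Bool)) : PySem.Dict Int Bool :=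
  (PySem.List.pyRange 1 (n+1) 1).foldl
    (fun d j => d.insert (m * n + j) (PySem.Dict.getD (PySem.Dict.mk b) j false)) PySem.Dict.empty

def self_concatenate_alt (assignment : List (List (Int × Bool))) (k : Int) : List (List (Int × Bool)) :=
  match assignment with
  | [] => []   -- Python raises IndexError at len(assignment[0]) here (outside Pre_)
  | cw0 :: _ =>
    let n : Int := cw0.length
    if k == 1 then assignment
    else
      (PySem.List.pyRange 1 k 1).foldl
        (fun result m => result.flatMap (fun e =>
          assignment.map (fun b => (PySem.Dict.ofList (e ++ (pvCompB m n b).items)).items)))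
        (assignment.map (fun cw => (pvCompB 0 n cw).items))

-- ===== PRECONDITION & SPEC =====
-- Pre_ excludes exactly the inputs where the Python A raises: empty assignment (IndexError),
-- k < 1 (ValueError), and codewords of differing length (AssertionError).
def Pre_self_concatenate (assignment : List (List (Int × Bool))) (k : Int) : Prop :=
  assignment ≠ [] ∧ 1 ≤ k ∧ ∀ cw ∈ assignment, cw.length = assignment.headI.length
instance (assignment : List (List (Int × Bool))) (k : Int) : Decidable (Pre_self_concatenate assignment k) := by unfold Pre_self_concatenate; infer_instance
def pvWitness_self_concatenate : (List (List (Int × Bool))) × Int := ([[(1, true)], [(1, false)]], 2)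

def Spec_self_concatenate (assignment : List (List (Int × Bool))) (k : Int) (out : List (List (Int × Bool))) : Prop := out = self_concatenate_alt assignment k
instance (assignment : List (List (Int × Bool))) (k : Int) (out : List (List (Int × Bool))) : Decidable (Spec_self_concatenate assignment k out) := by unfold Spec_self_concatenate; infer_instance

-- ===== CLAIM (what is proved, stated in full; the proofs are below) =====
def Claim_equal_self_concatenate : Prop := ∀ (assignment : List (List (Int × Bool))) (k : Int), Dom_self_concatenate assignment k → Pre_self_concatenate assignment k → Spec_self_concatenate assignment k (self_concatenate assignment k)

-- ===== LEMMAS AND PROOFS =====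

-- the pairs one block of the result consists of: keys i*n+1 .. i*n+n
def blkL (i n : Int) (cw : List (Int × Bool)) : List (Int × Bool) :=
  (PySem.List.pyRange 1 (n+1) 1).map (fun j => (i * n + j, PySem.Dict.getD (PySem.Dict.mk cw) j false))

-- concatenated blocks of a tuple of codewords, block indices from s
def catB (n : Int) : Int → List (List (Int × Bool)) → List (Int × Bool)
  | _, [] => []
  | s, c :: t => blkL s n c ++ catB n (s+1) t

theorem blkL_keys (i n : Int) (cw : List (Int × Bool)) :
    ∀ x ∈ (blkL i n cw).map (·.1), i * n + 1 ≤ x ∧ x < i * n + n + 1 := by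
  intro x hx
  simp only [blkL, List.map_map, List.mem_map, Function.comp] at hx
  obtain ⟨j, hj, rfl⟩ := hx
  rw [PySem.List.mem_pyRange_one] at hj
  omega

theorem blkL_keys_nodup (i n : Int) (cw : List (Int × Bool)) :
    ((blkL i n cw).map (·.1)).Nodup := by
  have h : (blkL i n cw).map (·.1) = (PySem.List.pyRange 1 (n+1) 1).map (fun j => i * n + j) := by
    simp [blkL, List.map_map, Function.comp_def]
  rw [h]
  exact (PySem.List.nodup_pyRange_one 1 (n+1)).map (fun a b hab => by linarith)

-- the inner 'for j in range(1, n+1)' loop of A appends one fresh block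
theorem inner_items (n i : Int) (cw : List (Int × Bool)) (d : PySem.Dict Int Bool)
    (hd : ∀ x ∈ d.keys, x < i * n + 1) :
    ((PySem.List.pyRange 1 (n+1) 1).foldl
        (fun d j => d.insert (i * n + j) (PySem.Dict.getD (PySem.Dict.mk cw) j false)) d).items
      = d.items ++ blkL i n cw := by
  rw [PySem.Dict.items_foldl_insert_fresh]
  · rfl
  · intro a ha
    rw [PySem.List.mem_pyRange_one] at ha
    rw [Bool.eq_false_iff]
    intro hc
    rw [PySem.Dict.contains_iff_mem_keys] at hc
    have := hd _ hc
    linarith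
  · exact (PySem.List.nodup_pyRange_one 1 (n+1)).map (fun a b hab => by linarith)

-- the outer 'for i, codeword in enumerate(...)' loop of A builds the concatenated blocks
theorem outer_items (n : Int) :
    ∀ (t : List (List (Int × Bool))) (s : Int) (d : PySem.Dict Int Bool),
    0 ≤ n → (∀ x ∈ d.keys, x < s * n + 1) →
    ((PySem.List.enumerate t s).foldl
        (fun d p =>
          (PySem.List.pyRange 1 (n+1) 1).foldl
            (fun d j => d.insert (p.1 * n + j) (PySem.Dict.getD (PySem.Dict.mk p.2) j false)) d) d).items
      = d.items ++ catB n s t := by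
  intro t
  induction t with
  | nil => intro s d _ _; simp [PySem.List.enumerate_nil, catB]
  | cons c t ih =>
    intro s d hn hd
    rw [PySem.List.enumerate_cons, List.foldl_cons]
    have h1 := inner_items n s c d hd
    have hkeys : ∀ x ∈ ((PySem.List.pyRange 1 (n+1) 1).foldl
        (fun d j => d.insert (s * n + j) (PySem.Dict.getD (PySem.Dict.mk c) j false)) d).keys,
        x < (s + 1) * n + 1 := by
      intro x hx
      simp only [PySem.Dict.keys, h1, List.map_append, List.mem_append] at hx
      have e : (s + 1) * n = s * n + n := by ring
      rcases hx with hx | hx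
      · have := hd x (by simpa [PySem.Dict.keys] using hx)
        linarith
      · have := (blkL_keys s n c x hx).2
        linarith
    rw [ih (s+1) _ hn hkeys, h1, catB, List.append_assoc]

theorem catB_keys (n : Int) (hn : 0 ≤ n) :
    ∀ (t : List (List (Int × Bool))) (s : Int),
    ∀ x ∈ (catB n s t).map (·.1), s * n + 1 ≤ x ∧ x < (s + t.length) * n + 1 := by
  intro t
  induction t with
  | nil => intro s x hx; simp [catB] at hx
  | cons c t ih =>
    intro s x hx
    simp only [catB, List.map_append, List.mem_append] at hx
    have hlen : (0:Int) ≤ (t.length : Int) := by positivity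
    have hmul : (0:Int) ≤ (t.length : Int) * n := mul_nonneg hlen hn
    have e1 : (s + ((t.length : Int) + 1)) * n = s * n + (t.length : Int) * n + n := by ring
    have e2 : ((s + 1) + (t.length : Int)) * n = s * n + (t.length : Int) * n + n := by ring
    have e3 : (s + 1) * n = s * n + n := by ring
    simp only [List.length_cons]
    push_cast
    rcases hx with hx | hx
    · have h := blkL_keys s n c x hx
      exact ⟨by linarith [h.1], by linarith [h.2]⟩
    · have h := ih (s+1) x hx
      exact ⟨by linarith [h.1], by linarith [h.2]⟩

theorem catB_keys_nodup (n : Int) (hn : 0 ≤ n) :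
    ∀ (t : List (List (Int × Bool))) (s : Int), ((catB n s t).map (·.1)).Nodup := by
  intro t
  induction t with
  | nil => intro s; simp [catB]
  | cons c t ih =>
    intro s
    simp only [catB, List.map_append]
    refine List.Nodup.append (blkL_keys_nodup s n c) (ih (s+1)) ?_
    intro x hx hx'
    have h1 := (blkL_keys s n c x hx).2
    have h2 := (catB_keys n hn t (s+1) x hx').1
    have e : (s + 1) * n = s * n + n := by ring
    linarith

-- dict(pairs) with distinct keys keeps the pairs list unchanged
theorem ofList_items (l : List (Int × Bool)) (h : (l.map (·.1)).Nodup) :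
    (PySem.Dict.ofList l).items = l := by
  have he : PySem.Dict.ofList l = l.foldl (fun d a => d.insert a.1 a.2) PySem.Dict.empty := rfl
  rw [he, PySem.Dict.items_foldl_insert_fresh]
  · have h0 : (PySem.Dict.empty : PySem.Dict Int Bool).items = [] := rfl
    simp [h0]
  · intro a _; rfl
  · exact h

theorem pvCompB_items (m n : Int) (b : List (Int × Bool)) :
    (pvCompB m n b).items = blkL m n b := by
  have := inner_items n m b PySem.Dict.empty (by intro x hx; simp [PySem.Dict.keys, PySem.Dict.empty] at hx)
  simpa [pvCompB] using this

theorem pvTuples_length (A : List (List (Int × Bool))) :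
    ∀ (m : Nat), ∀ t ∈ pvTuples A m, t.length = m := by
  intro m
  induction m with
  | zero => intro t ht; simp [pvTuples] at ht; simp [ht]
  | succ m ih =>
    intro t ht
    simp only [pvTuples, List.mem_flatMap, List.mem_map] at ht
    obtain ⟨a, _, t', ht', rfl⟩ := ht
    simp [ih t' ht']

theorem pvTuples_one (A : List (List (Int × Bool))) :
    pvTuples A 1 = A.map (fun a => [a]) := by
  have h : ∀ (l : List (List (Int × Bool))), l.flatMap (fun a => [[a]]) = l.map (fun a => [a]) := by
    intro l
    induction l with
    | nil => rfl
    | cons x l ih => simp [ih]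
  exact h A

theorem pvTuples_snoc (A : List (List (Int × Bool))) :
    ∀ (m : Nat), pvTuples A (m+1) = (pvTuples A m).flatMap (fun t => A.map (fun b => t ++ [b])) := by
  intro m
  induction m with
  | zero =>
    rw [pvTuples_one]
    show _ = List.flatMap (fun t => A.map (fun b => t ++ [b])) [[]]
    simp
  | succ m ih =>
    show A.flatMap (fun a => (pvTuples A (m+1)).map (fun t => a :: t))
        = (A.flatMap (fun a => (pvTuples A m).map (fun t => a :: t))).flatMap
            (fun t => A.map (fun b => t ++ [b]))
    rw [ih]
    simp only [List.map_flatMap, List.flatMap_assoc, List.flatMap_map, List.map_map]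
    simp [Function.comp_def]

theorem catB_snoc (n : Int) (b : List (Int × Bool)) :
    ∀ (t : List (List (Int × Bool))) (s : Int),
    catB n s (t ++ [b]) = catB n s t ++ blkL (s + (t.length : Int)) n b := by
  intro t
  induction t with
  | nil => intro s; simp [catB]
  | cons c t ih =>
    intro s
    simp only [List.cons_append, catB, ih (s+1), List.append_assoc, List.length_cons]
    congr 3
    push_cast
    ring

-- the fold of B computes the mapped tuples of A
theorem foldB (A : List (List (Int × Bool))) (n : Int) (hn : 0 ≤ n) :
    ∀ (m : Nat), 1 ≤ m →
    (PySem.List.pyRange 1 (m : Int) 1).foldl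
        (fun result m => result.flatMap (fun e =>
          A.map (fun b => (PySem.Dict.ofList (e ++ (pvCompB m n b).items)).items)))
        (A.map (fun cw => (pvCompB 0 n cw).items))
      = (pvTuples A m).map (catB n 0) := by
  intro m hm
  induction m, hm using Nat.le_induction with
  | base =>
    rw [Nat.cast_one, PySem.List.pyRange_one_eq_nil le_rfl, List.foldl_nil,
      pvTuples_one, List.map_map]
    refine List.map_congr_left (fun cw _ => ?_)
    simp [pvCompB_items, catB]
  | succ m hm ih =>
    have hcast : ((m + 1 : Nat) : Int) = (m : Int) + 1 := by push_cast; ring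
    rw [hcast, PySem.List.pyRange_one_succ_right (by exact_mod_cast hm), List.foldl_append,
      ih, List.foldl_cons, List.foldl_nil, pvTuples_snoc A m, List.flatMap_map, List.map_flatMap]
    refine List.flatMap_congr (fun t ht => ?_)
    have hlen : t.length = m := pvTuples_length A m t ht
    rw [List.map_map]
    refine List.map_congr_left (fun b _ => ?_)
    show (PySem.Dict.ofList (catB n 0 t ++ (pvCompB (m : Int) n b).items)).items
        = catB n 0 (t ++ [b])
    have hnd : ((catB n 0 t ++ blkL (m : Int) n b).map (·.1)).Nodup := by
      rw [List.map_append]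
      refine List.Nodup.append (catB_keys_nodup n hn t 0) (blkL_keys_nodup (m : Int) n b) ?_
      intro x hx hx'
      have h1 := (catB_keys n hn t 0 x hx).2
      have h2 := (blkL_keys (m : Int) n b x hx').1
      rw [hlen] at h1
      simp only [zero_add] at h1
      linarith
    rw [pvCompB_items, ofList_items _ hnd, catB_snoc, hlen, zero_add]

-- ===== VERDICT (by name: the statement is the Claim_ definition above) =====
theorem self_concatenate_spec : Claim_equal_self_concatenate := by
  intro assignment k _ hpre
  obtain ⟨hne, hk, _⟩ := hpre
  unfold Spec_self_concatenate
  match assignment with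
  | [] => exact absurd rfl hne
  | cw0 :: rest =>
    by_cases h1 : k = 1
    · simp [self_concatenate, self_concatenate_alt, h1]
    · have hk2 : 2 ≤ k := by omega
      have hn : (0:Int) ≤ (cw0.length : Int) := by positivity
      have hA : self_concatenate (cw0 :: rest) k
          = (pvTuples (cw0 :: rest) k.toNat).map (catB (cw0.length : Int) 0) := by
        simp only [self_concatenate, beq_iff_eq, if_neg h1]
        rw [PySem.List.foldl_append_singleton_eq_map]
        refine List.map_congr_left (fun t _ => ?_)
        have := outer_items (cw0.length : Int) t 0 PySem.Dict.empty hn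
          (by intro x hx; simp [PySem.Dict.keys, PySem.Dict.empty] at hx)
        simpa using this
      have hB : self_concatenate_alt (cw0 :: rest) k
          = (pvTuples (cw0 :: rest) k.toNat).map (catB (cw0.length : Int) 0) := by
        simp only [self_concatenate_alt, beq_iff_eq, if_neg h1]
        have h := foldB (cw0 :: rest) (cw0.length : Int) hn k.toNat (by omega)
        rw [Int.toNat_of_nonneg (by omega)] at h
        exact h
      rw [hA, hB]
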